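-- pv_equiv track=rewrite | github.com/HatPdotS/Crystfel_tools | crystfel_tools/crystfel_tools.py | config_equal
-- ===== SOURCE A (Python) =====
-- def config_equal(config1,config2):
--     for key in config1.keys():
--         if config1[key] == None:
--             continue
--         if not key in config2.keys():
--             return False
--         if config1[key] != config2[key]:
--             return False
--     for key in config2.keys():
--         if config2[key] == None:
--             continue
--         if not key in config1.keys():
--             return False
--         if config2[key] != config1[key]:
--             return False
--     return True
-- ===== SOURCE B (Python) =====
-- def config_equal(config1, config2):
--     d1 = {k: v for k, v in config1.items() if not (v == None)}
--     d2 = {k: v for k, v in config2.items() if not (v == None)}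
--     return d1 == d2
-- ===== Notes on version B (the rewrite author's own statement) =====
-- stated objective: simpler
-- what changed: Replaces A's two symmetric key-by-key scanning loops with early returns by building two None-filtered dict comprehensions and comparing them with a single dict equality.
import Mathlib
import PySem

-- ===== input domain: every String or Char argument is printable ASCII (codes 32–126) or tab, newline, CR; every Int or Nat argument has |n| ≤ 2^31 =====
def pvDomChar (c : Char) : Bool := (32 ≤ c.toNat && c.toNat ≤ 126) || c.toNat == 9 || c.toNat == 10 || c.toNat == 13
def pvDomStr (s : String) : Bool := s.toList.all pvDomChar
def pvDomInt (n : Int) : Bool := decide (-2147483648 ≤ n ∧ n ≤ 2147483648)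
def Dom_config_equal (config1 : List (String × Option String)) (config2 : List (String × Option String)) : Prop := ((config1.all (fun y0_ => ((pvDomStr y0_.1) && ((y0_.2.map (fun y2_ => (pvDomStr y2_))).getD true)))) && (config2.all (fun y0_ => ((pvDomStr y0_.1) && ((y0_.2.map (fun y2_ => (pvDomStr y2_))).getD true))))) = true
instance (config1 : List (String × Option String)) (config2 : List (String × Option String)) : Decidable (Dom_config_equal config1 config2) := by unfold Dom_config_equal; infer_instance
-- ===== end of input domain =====

-- B replaces A's two symmetric scanning loops by a filter-then-compare decomposition (objective: simpler).

-- ===== PORT A =====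
-- dict subscription / membership: first-match lookup in the association list (exact for the unique-key lists Pre_ admits)
def pyLookup : List (String × Option String) → String → Option (Option String)
  | [], _ => none
  | (k, v) :: rest, x => if k == x then some v else pyLookup rest x

-- one of A's two symmetric loops: scan `d`'s items, skipping None values, requiring `other` to hold the same value
def configScan (other : List (String × Option String)) : List (String × Option String) → Bool
  | [] => true
  | (k, v) :: rest =>
    if v == none then configScan other rest
    else
      match pyLookup other k with
      | none => false
      | some w => if v != w then false else configScan other rest

def config_equal (config1 : List (String × Option String)) (config2 : List (String × Option String)) : Bool :=
  if configScan config2 config1 then configScan config1 config2 else false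

-- ===== PORT B =====
-- Python dict equality ignores order: same keys, same values (checked via lookups both ways)
def pyDictEq (d1 d2 : List (String × Option String)) : Bool :=
  (d1.all fun p => pyLookup d2 p.1 == some p.2) && (d2.all fun p => pyLookup d1 p.1 == some p.2)

def config_equal_alt (config1 : List (String × Option String)) (config2 : List (String × Option String)) : Bool :=
  pyDictEq (config1.filter fun p => !(p.2 == none)) (config2.filter fun p => !(p.2 == none))

-- ===== PRECONDITION & SPEC =====
-- Pre_ excludes lists with duplicate keys: a Python dict cannot contain duplicates, so such lists do not
-- faithfully encode a dict input, and first-vs-last binding behaviour there is an artefact of the encoding.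
def Pre_config_equal (config1 : List (String × Option String)) (config2 : List (String × Option String)) : Prop :=
  (config1.map Prod.fst).Nodup ∧ (config2.map Prod.fst).Nodup
instance (config1 : List (String × Option String)) (config2 : List (String × Option String)) : Decidable (Pre_config_equal config1 config2) := by unfold Pre_config_equal; infer_instance

def pvWitness_config_equal : (List (String × Option String)) × (List (String × Option String)) :=
  ([("a", some "1"), ("b", none)], [("a", some "1")])

def Spec_config_equal (config1 : List (String × Option String)) (config2 : List (String × Option String)) (out : Bool) : Prop := out = config_equal_alt config1 config2
instance (config1 : List (String × Option String)) (config2 : List (String × Option String)) (out : Bool) : Decidable (Spec_config_equal config1 config2 out) := by unfold Spec_config_equal; infer_instance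

-- ===== CLAIM (what is proved, stated in full; the proofs are below) =====
def Claim_equal_config_equal : Prop := ∀ (config1 : List (String × Option String)) (config2 : List (String × Option String)), Dom_config_equal config1 config2 → Pre_config_equal config1 config2 → Spec_config_equal config1 config2 (config_equal config1 config2)

-- ===== LEMMAS AND PROOFS =====

theorem pyLookup_eq_none_of_not_mem (d : List (String × Option String)) (k : String)
    (h : k ∉ d.map Prod.fst) : pyLookup d k = none := by
  induction d with
  | nil => rfl
  | cons p rest ih =>
    obtain ⟨k', v'⟩ := p
    simp only [List.map_cons, List.mem_cons, not_or] at h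
    simp only [pyLookup]
    rw [if_neg (fun hc => h.1 ((beq_iff_eq.mp hc).symm))]
    exact ih h.2

theorem beq_none_false_of_ne {w : Option String} (hw : w ≠ none) : (w == none) = false := by
  cases w with
  | none => exact absurd rfl hw
  | some a => rfl

-- with unique keys, looking up a non-None value in the filtered list agrees with the raw lookup
theorem pyLookup_filter (d : List (String × Option String)) (k : String) (v : Option String)
    (hv : v ≠ none) (hnd : (d.map Prod.fst).Nodup) :
    ((pyLookup (d.filter fun p => !(p.2 == none)) k == some v) : Bool)
      = (pyLookup d k == some v) := by
  induction d with
  | nil => rfl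
  | cons p rest ih =>
    obtain ⟨k', w⟩ := p
    simp only [List.map_cons, List.nodup_cons] at hnd
    rw [List.filter_cons]
    by_cases hw : w = none
    · subst hw
      have hc : (!(((k', (none : Option String)).2 == none))) = false := rfl
      rw [hc, if_neg Bool.false_ne_true]
      simp only [pyLookup]
      by_cases hk : (k' == k) = true
      · rw [if_pos hk]
        have hk' : k' = k := beq_iff_eq.mp hk
        subst hk'
        have hnone : pyLookup (rest.filter fun p => !(p.2 == none)) k' = none := by
          apply pyLookup_eq_none_of_not_mem
          intro hmem
          apply hnd.1
          exact List.map_subset Prod.fst (fun x hx => List.mem_of_mem_filter hx) hmem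
        rw [hnone]
        have hne : ((some (none : Option String) == some v) : Bool) = false := by
          cases v with
          | none => exact absurd rfl hv
          | some a => rfl
        rw [hne]; rfl
      · rw [if_neg hk]
        exact ih hnd.2
    · have hc : (!(((k', w).2 == none))) = true := by
        simp only [beq_none_false_of_ne hw, Bool.not_false]
      rw [hc, if_pos rfl]
      simp only [pyLookup]
      by_cases hk : (k' == k) = true
      · rw [if_pos hk, if_pos hk]
      · rw [if_neg hk, if_neg hk]
        exact ih hnd.2

-- one loop of A equals one direction of B's dict-equality check
theorem configScan_eq_all (d other : List (String × Option String))
    (hnd : (other.map Prod.fst).Nodup) :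
    configScan other d
      = ((d.filter fun p => !(p.2 == none)).all
          fun p => pyLookup (other.filter fun q => !(q.2 == none)) p.1 == some p.2) := by
  induction d with
  | nil => rfl
  | cons p rest ih =>
    obtain ⟨k, v⟩ := p
    rw [List.filter_cons]
    by_cases hv : v = none
    · subst hv
      have hc : (!(((k, (none : Option String)).2 == none))) = false := rfl
      rw [hc, if_neg Bool.false_ne_true]
      simpa [configScan] using ih
    · have hv' : (v == none) = false := beq_none_false_of_ne hv
      have hc : (!(((k, v).2 == none))) = true := by
        simp only [hv', Bool.not_false]
      rw [hc, if_pos rfl]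
      simp only [configScan, hv', Bool.false_eq_true, if_false, List.all_cons]
      rw [pyLookup_filter other k v hv hnd]
      cases hl : pyLookup other k with
      | none => simp
      | some w =>
        by_cases hvw : v = w
        · subst hvw
          simp [ih]
        · have hvw' : (v == w) = false := beq_eq_false_iff_ne.mpr hvw
          have h1 : (v != w) = true := by simp [bne, hvw']
          have h2 : ((some w == some v) : Bool) = false := by
            rw [show ((some w == some v) : Bool) = (w == v) from rfl]
            exact beq_eq_false_iff_ne.mpr (fun h => hvw h.symm)
          simp [h1, h2]

theorem config_equal_spec : Claim_equal_config_equal := by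
  intro config1 config2 _ hpre
  unfold Spec_config_equal config_equal config_equal_alt pyDictEq
  rw [configScan_eq_all config1 config2 hpre.2, configScan_eq_all config2 config1 hpre.1]
  cases h1 : ((config1.filter fun p => !(p.2 == none)).all
      fun p => pyLookup (config2.filter fun q => !(q.2 == none)) p.1 == some p.2) <;> simp
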